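-- pv_equiv track=rewrite | github.com/KIParla/tools | make_patch.py | format_align
-- ===== SOURCE A (Python) =====
-- def format_align(d: dict[str, str]) -> str:
--     """{'Begin': '4.696', 'End': '5.034'} → 'Begin=4.696|End=5.034'"""
--     if not d:
--         return '_'
--     parts = []
--     for k in ('Begin', 'End'):
--         if k in d:
--             parts.append(f'{k}={d[k]}')
--     for k, v in d.items():
--         if k not in ('Begin', 'End'):
--             parts.append(f'{k}={v}')
--     return '|'.join(parts)
-- ===== SOURCE B (Python) =====
-- def format_align(d: dict[str, str]) -> str:
--     if not d:
--         return '_'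
--     pairs = sorted(d.items(), key=lambda kv: 0 if kv[0] == 'Begin' else 1 if kv[0] == 'End' else 2)
--     return '|'.join(f'{k}={v}' for k, v in pairs)
-- ===== Notes on version B (the rewrite author's own statement) =====
-- stated objective: simpler
-- what changed: Replaces A's two separate collection passes (a priority loop over ('Begin','End') with membership tests plus a second loop over all items) by a single stable sort of the items under a 3-valued priority key, then one join.
import Mathlib
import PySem

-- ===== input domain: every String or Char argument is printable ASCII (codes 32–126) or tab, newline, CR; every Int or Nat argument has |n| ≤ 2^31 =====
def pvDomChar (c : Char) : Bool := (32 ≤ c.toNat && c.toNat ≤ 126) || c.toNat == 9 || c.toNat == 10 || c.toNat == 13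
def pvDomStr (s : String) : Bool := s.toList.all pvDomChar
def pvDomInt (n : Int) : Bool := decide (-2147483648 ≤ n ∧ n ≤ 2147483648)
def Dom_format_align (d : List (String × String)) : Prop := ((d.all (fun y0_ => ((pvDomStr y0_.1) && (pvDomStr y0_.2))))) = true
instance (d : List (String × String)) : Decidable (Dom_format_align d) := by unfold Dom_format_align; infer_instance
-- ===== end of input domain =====

-- B replaces A's two collection passes by one stable sort under a 3-valued priority key; objective: simpler.

-- ===== PORT A =====
-- dict lookup (first match, per the association-list convention)
def pvLookup (d : List (String × String)) (k : String) : Option String :=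
  (d.find? (fun kv => kv.1 == k)).map (·.2)

def format_align (d : List (String × String)) : String :=
  if d = [] then "_"
  else
    let parts : List String := []
    let parts := (["Begin", "End"]).foldl (fun parts k =>
      match pvLookup d k with
      | some v => parts ++ [k ++ "=" ++ v]
      | none => parts) parts
    let parts := d.foldl (fun parts kv =>
      if kv.1 ≠ "Begin" ∧ kv.1 ≠ "End" then parts ++ [kv.1 ++ "=" ++ kv.2] else parts) parts
    PySem.Str.join "|" parts

-- ===== PORT B =====
def pvPrio (kv : String × String) : Int :=
  if kv.1 = "Begin" then 0 else if kv.1 = "End" then 1 else 2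

def format_align_alt (d : List (String × String)) : String :=
  if d = [] then "_"
  else
    let pairs := PySem.List.sorted d pvPrio
    PySem.Str.join "|" (pairs.map (fun kv => kv.1 ++ "=" ++ kv.2))

-- ===== PRECONDITION & SPEC =====
-- Pre_ restricts to association lists with pairwise-distinct keys: only those represent a
-- Python dict (A's actual input type); on duplicate keys neither order nor value is specified.
def Pre_format_align (d : List (String × String)) : Prop := (d.map Prod.fst).Nodup
instance (d : List (String × String)) : Decidable (Pre_format_align d) := by unfold Pre_format_align; infer_instance

def pvWitness_format_align : (List (String × String)) :=
  [("word", "ciao"), ("Begin", "4.696"), ("End", "5.034")]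

def Spec_format_align (d : List (String × String)) (out : String) : Prop := out = format_align_alt d
instance (d : List (String × String)) (out : String) : Decidable (Spec_format_align d out) := by unfold Spec_format_align; infer_instance

-- ===== CLAIM (what is proved, stated in full; the proofs are below) =====
def Claim_equal_format_align : Prop := ∀ (d : List (String × String)), Dom_format_align d → Pre_format_align d → Spec_format_align d (format_align d)

-- ===== LEMMAS AND PROOFS =====

-- inserting behind a block it does not go before
theorem insertBy_append_of_not_before {α : Type} (before : α → α → Bool) (x : α)
    (l1 l2 : List α) (h : ∀ y ∈ l1, before x y = false) :
    PySem.List.insertBy before x (l1 ++ l2) = l1 ++ PySem.List.insertBy before x l2 := by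
  induction l1 with
  | nil => rfl
  | cons y ys ih =>
    simp only [List.cons_append, PySem.List.insertBy, h y (by simp)]
    simp only [Bool.false_eq_true, if_false, List.cons.injEq, true_and]
    exact ih (fun z hz => h z (by simp [hz]))

theorem insertBy_eq_cons {α : Type} (before : α → α → Bool) (x : α)
    (l : List α) (h : ∀ y ∈ l, before x y = true) :
    PySem.List.insertBy before x l = x :: l := by
  cases l with
  | nil => rfl
  | cons y ys => simp [PySem.List.insertBy, h y (by simp)]

-- the stable 3-valued-priority sort is the concatenation of the three filters, in order
theorem sorted_prio_eq_filters (d : List (String × String)) :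
    PySem.List.sorted d pvPrio =
      d.filter (fun kv => kv.1 == "Begin") ++ d.filter (fun kv => kv.1 == "End")
        ++ d.filter (fun kv => !(kv.1 == "Begin") && !(kv.1 == "End")) := by
  rw [PySem.List.sorted_eq_foldl_insertBy]
  induction d using List.reverseRecOn with
  | nil => rfl
  | append_singleton xs x ih =>
    rw [List.foldl_append, List.foldl_cons, List.foldl_nil, ih]
    simp only [List.filter_append, List.filter_cons, List.filter_nil]
    have pf0 : ∀ y ∈ xs.filter (fun kv => kv.1 == "Begin"), pvPrio y = 0 := by
      intro y hy
      have := (List.mem_filter.mp hy).2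
      simp_all [pvPrio]
    have pf1 : ∀ y ∈ xs.filter (fun kv => kv.1 == "End"), pvPrio y = 1 := by
      intro y hy
      have := (List.mem_filter.mp hy).2
      simp only [beq_iff_eq] at this
      simp [pvPrio, this]
    have pf2 : ∀ y ∈ xs.filter (fun kv => !(kv.1 == "Begin") && !(kv.1 == "End")), pvPrio y = 2 := by
      intro y hy
      have := (List.mem_filter.mp hy).2
      simp only [Bool.and_eq_true, Bool.not_eq_eq_eq_not, Bool.not_true, beq_eq_false_iff_ne] at this
      simp [pvPrio, this.1, this.2]
    by_cases hB : x.1 = "Begin"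
    · have hx : pvPrio x = 0 := by simp only [pvPrio, hB]; rfl
      rw [List.append_assoc, insertBy_append_of_not_before _ x _ _
        (fun y hy => by simp [pf0 y hy, hx])]
      rw [insertBy_eq_cons _ x _ (fun y hy => by
        rcases List.mem_append.mp hy with h | h
        · simp [pf1 y h, hx]
        · simp [pf2 y h, hx])]
      simp [hB]
    · by_cases hE : x.1 = "End"
      · have hx : pvPrio x = 1 := by simp only [pvPrio]; rw [if_neg hB, if_pos hE]
        rw [List.append_assoc, insertBy_append_of_not_before _ x _ _
          (fun y hy => by simp [pf0 y hy, hx])]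
        rw [insertBy_append_of_not_before _ x _ _ (fun y hy => by simp [pf1 y hy, hx])]
        rw [insertBy_eq_cons _ x _ (fun y hy => by simp [pf2 y hy, hx])]
        simp [hE]
      · have hx : pvPrio x = 2 := by simp only [pvPrio]; rw [if_neg hB, if_neg hE]
        rw [List.append_assoc, insertBy_append_of_not_before _ x _ _
          (fun y hy => by simp [pf0 y hy, hx])]
        rw [insertBy_append_of_not_before _ x _ _ (fun y hy => by simp [pf1 y hy, hx])]
        rw [show PySem.List.insertBy (fun a b => decide (pvPrio a < pvPrio b)) x
              (xs.filter (fun kv => !(kv.1 == "Begin") && !(kv.1 == "End"))) =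
            xs.filter (fun kv => !(kv.1 == "Begin") && !(kv.1 == "End")) ++ [x] from by
          have := insertBy_append_of_not_before (fun a b => decide (pvPrio a < pvPrio b)) x
            (xs.filter (fun kv => !(kv.1 == "Begin") && !(kv.1 == "End"))) []
            (fun y hy => by simp [pf2 y hy, hx])
          simpa [PySem.List.insertBy] using this]
        simp [hB, hE]

-- with nodup keys, the filter for key k is exactly the find?-singleton
theorem filter_eq_find_singleton (d : List (String × String)) (k : String)
    (h : (d.map Prod.fst).Nodup) :
    d.filter (fun kv => kv.1 == k) =
      match d.find? (fun kv => kv.1 == k) with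
      | some kv => [kv]
      | none => [] := by
  induction d with
  | nil => rfl
  | cons x xs ih =>
    simp only [List.map_cons, List.nodup_cons] at h
    by_cases hx : x.1 == k
    · simp only [List.filter_cons, List.find?_cons, hx]
      have : xs.filter (fun kv => kv.1 == k) = [] := by
        rw [List.filter_eq_nil_iff]
        intro y hy hyk
        exact h.1 (by
          have : y.1 = k := by simpa using hyk
          have hxk : x.1 = k := by simpa using hx
          rw [hxk, ← this]
          exact List.mem_map_of_mem hy)
      simp [this]
    · simp only [List.filter_cons, List.find?_cons, Bool.not_eq_true] at hx ⊢
      rw [hx]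
      simpa using ih h.2

theorem format_align_eq (d : List (String × String)) (h : (d.map Prod.fst).Nodup) :
    format_align d = format_align_alt d := by
  unfold format_align format_align_alt
  by_cases hd : d = []
  · simp [hd]
  · simp only [if_neg hd]
    congr 1
    -- the first loop of A, unrolled over the two priority keys
    rw [List.foldl_cons, List.foldl_cons, List.foldl_nil]
    -- the second loop of A is an append-filter fold
    rw [show (fun (parts : List String) (kv : String × String) =>
          if kv.1 ≠ "Begin" ∧ kv.1 ≠ "End" then parts ++ [kv.1 ++ "=" ++ kv.2] else parts) =
        (fun parts kv =>
          if (!(kv.1 == "Begin") && !(kv.1 == "End")) = true then parts ++ [kv.1 ++ "=" ++ kv.2]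
          else parts) from by
      funext parts kv
      by_cases h1 : kv.1 = "Begin" <;> by_cases h2 : kv.1 = "End" <;> simp [h1, h2]]
    rw [PySem.List.foldl_append_if]
    rw [sorted_prio_eq_filters, List.map_append, List.map_append]
    congr 1
    -- the priority part: find?-based appends equal the maps of the two filters
    rw [filter_eq_find_singleton d "Begin" h, filter_eq_find_singleton d "End" h]
    unfold pvLookup
    cases hB : d.find? (fun kv => kv.1 == "Begin") with
    | none =>
      cases hE : d.find? (fun kv => kv.1 == "End") with
      | none => simp
      | some kvE =>
        have : kvE.1 = "End" := by simpa using List.find?_some hE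
        simp [this]
    | some kvB =>
      have hB1 : kvB.1 = "Begin" := by simpa using List.find?_some hB
      cases hE : d.find? (fun kv => kv.1 == "End") with
      | none => simp [hB1]
      | some kvE =>
        have hE1 : kvE.1 = "End" := by simpa using List.find?_some hE
        simp [hB1, hE1]

-- ===== VERDICT (by name: the statement is the Claim_ definition above) =====
theorem format_align_spec : Claim_equal_format_align := by
  intro d _ hpre
  exact format_align_eq d hpre
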